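-- pv_equiv track=rewrite | github.com/jdvelasq/techminer2 | techminer2/database/_internals/operators/highlight.py | fix_units
-- ===== SOURCE A (Python) =====
-- def fix_units(text):
--
--     # Introduces errors in URLs
--     # text = re.sub(r"(\d)/([a-zA-Z_0-9]+)", r"\1 /\2", text)
--
--     # Units
--     for unit in [
--         "cad",
--         "capex",
--         "cent usd",
--         "cent",
--         "cents",
--         "cny",
--         "ct",
--         "day",
--         "dkk",
--         "dollars",
--         "e",
--         "eq.",
--         "eq",
--         "eur",
--         "euro",
--         "gwh",
--         "h",
--         "hr",
--         "irr",
--         "kg",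
--         "kw h",
--         "kw_hr",
--         "kw",
--         "kwel",
--         "kwh",
--         "kwh",
--         "kwhr",
--         "l",
--         "level",
--         "m",
--         "month",
--         "mw",
--         "mwh",
--         "mwwp",
--         "nt",
--         "omr",
--         "omr",
--         "rmb",
--         "s",
--         "t",
--         "ton",
--         "tons",
--         "twh",
--         "unit",
--         "us_cents",
--         "uscents",
--         "usd",
--         "year",
--         "yr",
--         "yuan",
--     ]:
--         text = text.replace(
--             f" {unit.upper().replace(' ', '_')}/",
--             f" {unit.lower().replace(' ', '_')}/",
--         )
--         text = text.replace(
--             f" {unit.upper().replace(' ', '_')}_/",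
--             f" {unit.lower().replace(' ', '_')}/",
--         )
--         text = text.replace(
--             f"/{unit.upper().replace(' ', '_')} ",
--             f"/{unit.lower().replace(' ', '_')} ",
--         )
--         text = text.replace(
--             f"/_{unit.upper().replace(' ', '_')} ",
--             f"/{unit.lower().replace(' ', '_')} ",
--         )
--
--     text = text.replace("POLENERGIA/EQUINOR", "polenergia/equinor")
--
--     return text
-- ===== SOURCE B (Python) =====
-- def fix_units(text):
--     # One pass: split on spaces, fix the slash-adjacent head/tail of each piece
--     # via a precomputed dict, instead of ~200 sequential whole-string replaces.
--     units = [
--         "cad", "capex", "cent usd", "cent", "cents", "cny", "ct", "day",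
--         "dkk", "dollars", "e", "eq.", "eq", "eur", "euro", "gwh", "h", "hr",
--         "irr", "kg", "kw h", "kw_hr", "kw", "kwel", "kwh", "kwh", "kwhr",
--         "l", "level", "m", "month", "mw", "mwh", "mwwp", "nt", "omr", "omr",
--         "rmb", "s", "t", "ton", "tons", "twh", "unit", "us_cents", "uscents",
--         "usd", "year", "yr", "yuan",
--     ]
--     mapping = {}
--     for unit in units:
--         mapping[unit.upper().replace(" ", "_")] = unit.lower().replace(" ", "_")
--     pieces = text.split(" ")
--     last = len(pieces) - 1
--     out = []
--     for k, piece in enumerate(pieces):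
--         parts = piece.split("/")
--         if len(parts) > 1:
--             if k > 0:
--                 head = parts[0]
--                 if head in mapping:
--                     parts[0] = mapping[head]
--                 elif head.endswith("_") and head[:-1] in mapping:
--                     parts[0] = mapping[head[:-1]]
--             if k < last:
--                 tail = parts[-1]
--                 if tail in mapping:
--                     parts[-1] = mapping[tail]
--                 elif tail.startswith("_") and tail[1:] in mapping:
--                     parts[-1] = mapping[tail[1:]]
--             piece = "/".join(parts)
--         out.append(piece)
--     return " ".join(out).replace("POLENERGIA/EQUINOR", "polenergia/equinor")
-- ===== Notes on version B (the rewrite author's own statement) =====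
-- stated objective: faster
-- what changed: Replaces A's ~200 sequential whole-string replace passes (4 per unit) by a single split-on-space pass that fixes each piece's slash-adjacent head/tail token via one precomputed uppercase-to-lowercase dict, then one final literal replace.
import Mathlib
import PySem

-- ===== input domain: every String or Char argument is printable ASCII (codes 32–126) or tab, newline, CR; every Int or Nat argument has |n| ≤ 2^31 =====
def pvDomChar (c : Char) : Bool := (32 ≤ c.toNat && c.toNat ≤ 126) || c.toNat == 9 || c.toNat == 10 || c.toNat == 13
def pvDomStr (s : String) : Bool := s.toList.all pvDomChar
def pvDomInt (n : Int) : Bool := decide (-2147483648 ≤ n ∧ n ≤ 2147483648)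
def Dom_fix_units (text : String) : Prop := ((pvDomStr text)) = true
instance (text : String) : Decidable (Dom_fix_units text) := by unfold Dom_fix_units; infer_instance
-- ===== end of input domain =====

-- B replaces A's ~200 sequential whole-string replace passes by one split-on-space
-- pass that fixes each piece's slash-adjacent head/tail via a precomputed dict.

-- ===== PORT A =====
def pvUnits : List String :=
  ["cad", "capex", "cent usd", "cent", "cents", "cny", "ct", "day",
   "dkk", "dollars", "e", "eq.", "eq", "eur", "euro", "gwh", "h", "hr",
   "irr", "kg", "kw h", "kw_hr", "kw", "kwel", "kwh", "kwh", "kwhr",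
   "l", "level", "m", "month", "mw", "mwh", "mwwp", "nt", "omr", "omr",
   "rmb", "s", "t", "ton", "tons", "twh", "unit", "us_cents", "uscents",
   "usd", "year", "yr", "yuan"]

def fix_units (text : String) : String :=
  let text := pvUnits.foldl (fun text unit =>
    let up := PySem.Str.replace (PySem.Str.upper unit) " " "_"
    let lo := PySem.Str.replace (PySem.Str.lower unit) " " "_"
    let text := PySem.Str.replace text (" " ++ up ++ "/") (" " ++ lo ++ "/")
    let text := PySem.Str.replace text (" " ++ up ++ "_/") (" " ++ lo ++ "/")
    let text := PySem.Str.replace text ("/" ++ up ++ " ") ("/" ++ lo ++ " ")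
    let text := PySem.Str.replace text ("/_" ++ up ++ " ") ("/" ++ lo ++ " ")
    text) text
  PySem.Str.replace text "POLENERGIA/EQUINOR" "polenergia/equinor"

-- ===== PORT B =====
def fix_units_alt (text : String) : String :=
  let mapping : PySem.Dict String String := pvUnits.foldl (fun m unit =>
    m.insert (PySem.Str.replace (PySem.Str.upper unit) " " "_")
             (PySem.Str.replace (PySem.Str.lower unit) " " "_")) ⟨[]⟩
  let pieces := PySem.Chars.splitOn text.toList [' ']
  let last := pieces.length - 1
  let out := pieces.mapIdx (fun k piece =>
    let parts := PySem.Chars.splitOn piece ['/']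
    if parts.length > 1 then
      let parts :=
        if 0 < k then
          let head := parts.getD 0 []
          match mapping.get? (String.ofList head) with
          | some v => parts.set 0 v.toList
          | none =>
            if PySem.Chars.endswith head ['_'] then
              match mapping.get? (String.ofList (PySem.List.slice head none (some (-1)))) with
              | some v => parts.set 0 v.toList
              | none => parts
            else parts
        else parts
      let parts :=
        if k < last then
          -- parts[-1]: parts is never empty, so the default is never used
          let tl := (PySem.List.pyGet? parts (-1)).getD []
          match mapping.get? (String.ofList tl) with
          | some v => parts.set (parts.length - 1) v.toList
          | none =>
            if PySem.Chars.startswith tl ['_'] then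
              match mapping.get? (String.ofList (PySem.List.slice tl (some 1) none)) with
              | some v => parts.set (parts.length - 1) v.toList
              | none => parts
            else parts
        else parts
      PySem.Chars.join ['/'] parts
    else piece)
  PySem.Str.replace (String.ofList (PySem.Chars.join [' '] out))
    "POLENERGIA/EQUINOR" "polenergia/equinor"

-- ===== PRECONDITION & SPEC =====
def Spec_fix_units (text : String) (out : String) : Prop := out = fix_units_alt text
instance (text : String) (out : String) : Decidable (Spec_fix_units text out) := by unfold Spec_fix_units; infer_instance

-- ===== CLAIM (what is proved, stated in full; the proofs are below) =====
def Claim_equal_fix_units : Prop := ∀ (text : String), Dom_fix_units text → Spec_fix_units text (fix_units text)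

-- ===== LEMMAS AND PROOFS =====

def repl1 (o : Char) (os new : List Char) : List Char → List Char
  | [] => []
  | c :: t =>
    if (o::os).isPrefixOf (c::t) then new ++ repl1 o os new (t.drop os.length)
    else c :: repl1 o os new t
  termination_by l => l.length
  decreasing_by
  all_goals simp only [List.length_drop, List.length_cons]; omega

theorem replGo_eq (o : Char) (os new : List Char) :
    ∀ fuel l acc, l.length ≤ fuel →
      PySem.Chars.replace.go (o::os) new fuel l acc = acc.reverse ++ repl1 o os new l := by
  intro fuel
  induction fuel with
  | zero => intro l acc h; interval_cases hl : l.length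
            · simp at hl; simp [hl, PySem.Chars.replace.go, repl1]
  | succ n ih =>
    intro l acc h
    match l with
    | [] => simp [PySem.Chars.replace.go, repl1]
    | c :: t =>
      rw [PySem.Chars.replace.go]
      by_cases hp : (o::os).isPrefixOf (c::t)
      · rw [if_pos hp, repl1, if_pos hp]
        have : (List.drop os.length t).length ≤ n := by simp at h ⊢; omega
        rw [show List.drop (o::os).length (c::t) = t.drop os.length by simp]
        rw [ih _ _ this]
        simp
      · rw [if_neg hp, repl1, if_neg hp]
        rw [ih _ _ (by simp at h ⊢; omega)]
        simp

theorem replace_eq_repl1 (o : Char) (os new s : List Char) :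
    PySem.Chars.replace s (o::os) new = repl1 o os new s := by
  unfold PySem.Chars.replace
  rw [if_neg (by simp)]
  simpa using replGo_eq o os new s.length s [] le_rfl

-- clean structural version of str.split(sep) for a one-char sep
def splitc (c : Char) : List Char → List (List Char)
  | [] => [[]]
  | x :: r => if x = c then [] :: splitc c r else (splitc c r).modifyHead (x :: ·)

theorem splitGo_eq (c : Char) :
    ∀ fuel l cur acc, l.length < fuel →
      PySem.Chars.splitOn.go [c] fuel l cur acc
        = acc.reverse ++ (splitc c l).modifyHead (cur.reverse ++ ·) := by
  intro fuel
  induction fuel with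
  | zero => omega
  | succ n ih =>
    intro l cur acc h
    match l with
    | [] => simp [PySem.Chars.splitOn.go, splitc]
    | x :: r =>
      rw [PySem.Chars.splitOn.go]
      by_cases hx : x = c
      · subst hx
        rw [if_pos (by simp)]
        rw [show List.drop [x].length (x::r) = r by simp]
        rw [ih r [] (cur.reverse :: acc) (by simp at h; omega)]
        simp only [splitc, if_pos rfl]
        cases splitc x r <;> simp [List.modifyHead]
      · rw [if_neg (by simpa using fun h => hx h.symm)]
        rw [ih r (x :: cur) acc (by simp at h; omega)]
        rcases hs : splitc c r with _ | ⟨p, ps⟩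
        · simp [splitc, hx, hs]
        · simp [splitc, hx, hs]

theorem splitOn_eq_splitc (c : Char) (s : List Char) :
    PySem.Chars.splitOn s [c] = splitc c s := by
  unfold PySem.Chars.splitOn
  rw [splitGo_eq c (s.length + 1) s [] [] (by omega)]
  rcases hs : splitc c s with _ | ⟨p, ps⟩ <;> simp

def myJoin (c : Char) : List (List Char) → List Char
  | [] => []
  | p :: ps => p ++ ps.flatMap (fun q => c :: q)

theorem join_eq_myJoin (c : Char) (ps : List (List Char)) :
    PySem.Chars.join [c] ps = myJoin c ps := by
  unfold PySem.Chars.join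
  induction ps with
  | nil => simp [List.intercalate, myJoin]
  | cons p ps ih =>
    rcases ps with _ | ⟨q, ps'⟩
    · simp [List.intercalate, myJoin]
    · simp only [List.intercalate, List.intersperse] at ih ⊢
      simp [myJoin] at ih ⊢
      simp [ih]

theorem splitc_ne_nil (c : Char) (l : List Char) : splitc c l ≠ [] := by
  induction l with
  | nil => simp [splitc]
  | cons x r ih =>
    by_cases hx : x = c
    · simp [splitc, hx]
    · simp only [splitc, if_neg hx]
      rcases hs : splitc c r with _ | _
      · exact absurd hs ih
      · simp

theorem splitc_sepfree (c : Char) (l : List Char) : ∀ p ∈ splitc c l, c ∉ p := by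
  induction l with
  | nil => simp [splitc]
  | cons x r ih =>
    simp only [splitc]
    split_ifs with hx
    · intro p hp
      rcases List.mem_cons.mp hp with rfl | hp
      · simp
      · exact ih p hp
    · rcases hs : splitc c r with _ | ⟨q, qs⟩
      · exact absurd hs (splitc_ne_nil c r)
      · have ih' := hs ▸ ih
        intro p hp
        simp only [List.modifyHead] at hp
        rcases List.mem_cons.mp hp with rfl | hp
        · intro hc
          rcases List.mem_cons.mp hc with h | h
          · exact hx h.symm
          · exact ih' q (List.mem_cons_self ..) h
        · exact ih' p (List.mem_cons_of_mem _ hp)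

theorem myJoin_cons_ne_nil (c : Char) (p : List Char) (ps : List (List Char)) (h : ps ≠ []) :
    myJoin c (p :: ps) = p ++ c :: myJoin c ps := by
  rcases ps with _ | ⟨q, ps'⟩
  · simp at h
  · simp [myJoin]

theorem myJoin_splitc (c : Char) (l : List Char) : myJoin c (splitc c l) = l := by
  induction l with
  | nil => simp [splitc, myJoin]
  | cons x r ih =>
    simp only [splitc]
    split_ifs with hx
    · subst hx
      rw [myJoin_cons_ne_nil _ [] _ (splitc_ne_nil _ r)]
      simp [ih]
    · rcases hs : splitc c r with _ | ⟨q, qs⟩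
      · exact absurd hs (splitc_ne_nil c r)
      · rw [hs] at ih
        simp only [List.modifyHead]
        rcases qs with _ | ⟨q', qs'⟩
        · simp only [myJoin] at ih ⊢
          simpa using ih
        · rw [myJoin_cons_ne_nil _ _ _ (by simp)]
          rw [myJoin_cons_ne_nil _ _ _ (by simp)] at ih
          rw [← ih]
          simp

theorem myJoin_append_singleton (c : Char) (as : List (List Char)) (s : List Char) (h : as ≠ []) :
    myJoin c (as ++ [s]) = myJoin c as ++ c :: s := by
  induction as with
  | nil => simp at h
  | cons a as ih =>
    rcases as with _ | ⟨b, as'⟩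
    · simp [myJoin]
    · rw [List.cons_append, myJoin_cons_ne_nil c a _ (by simp),
          myJoin_cons_ne_nil c a _ (by simp), ih (by simp)]
      simp

@[simp] theorem repl1_nil (o : Char) (os new : List Char) : repl1 o os new [] = [] := by
  rw [repl1]

theorem repl1_walk (o : Char) (os new xs ys : List Char) (h : o ∉ xs) :
    repl1 o os new (xs ++ ys) = xs ++ repl1 o os new ys := by
  induction xs with
  | nil => simp
  | cons x xs ih =>
    have hox : o ≠ x := fun he => h (he ▸ List.mem_cons_self ..)
    rcases hys : xs ++ ys with _ | ⟨z, zs⟩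
    · rw [List.cons_append, hys, repl1]
      rw [if_neg (by simp [List.isPrefixOf_iff_prefix, List.cons_prefix_cons, hox])]
      have := ih (fun hm => h (List.mem_cons_of_mem _ hm))
      rw [hys] at this
      simp [this]
    · rw [List.cons_append, hys, repl1]
      rw [if_neg (by simp [List.isPrefixOf_iff_prefix, List.cons_prefix_cons, hox])]
      have := ih (fun hm => h (List.mem_cons_of_mem _ hm))
      rw [hys] at this
      simp [this]

theorem repl1_id_of_not_mem (o a : Char) (os new q : List Char)
    (ha : a ∈ o::os) (hq : a ∉ q) : repl1 o os new q = q := by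
  induction q with
  | nil => simp
  | cons c t ih =>
    rw [repl1, if_neg]
    · rw [ih (fun hm => hq (List.mem_cons_of_mem _ hm))]
    · intro hp
      rw [List.isPrefixOf_iff_prefix] at hp
      exact hq (hp.subset ha)

-- a sep-free pattern cannot see past a following separator
theorem prefix_append_sep_aux (c : Char) (pat : List Char) : ∀ (f R : List Char),
    c ∉ pat → c ∉ f → (R = [] ∨ ∃ Y, R = c::Y) → pat <+: f ++ R → pat <+: f := by
  induction pat with
  | nil => intro f R _ _ _ _; simp
  | cons a p' ih =>
    intro f R hpat hf hR h
    obtain ⟨ha, hp'⟩ : a ≠ c ∧ c ∉ p' := by simpa [not_or, eq_comm] using hpat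
    rcases f with _ | ⟨b, f'⟩
    · rcases hR with rfl | ⟨Y, rfl⟩
      · simpa using h
      · rw [List.nil_append] at h
        exact absurd (List.cons_prefix_cons.mp h).1 ha
    · obtain ⟨hb, hf'⟩ : c ≠ b ∧ c ∉ f' := by simpa [not_or] using hf
      rw [List.cons_append] at h
      obtain ⟨rfl, h2⟩ := List.cons_prefix_cons.mp h
      exact List.cons_prefix_cons.mpr ⟨rfl, ih f' R hp' hf' hR h2⟩

theorem prefix_append_sep (c : Char) (pat f R : List Char)
    (hpat : c ∉ pat) (hf : c ∉ f) (hR : R = [] ∨ ∃ Y, R = c::Y) :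
    pat <+: f ++ R ↔ pat <+: f :=
  ⟨prefix_append_sep_aux c pat f R hpat hf hR, fun h => h.trans (List.prefix_append f R)⟩

-- a sep-delimited token matches exactly the whole segment before the separator
theorem prefix_sep_iff (c : Char) (U : List Char) : ∀ (t Y : List Char),
    c ∉ U → c ∉ t → (U ++ [c] <+: t ++ c :: Y ↔ U = t) := by
  induction U with
  | nil =>
    intro t Y _ ht
    rcases t with _ | ⟨x, t'⟩
    · simp
    · obtain ⟨hx, _⟩ : c ≠ x ∧ c ∉ t' := by simpa [not_or] using ht
      constructor
      · intro h
        rw [List.nil_append, List.cons_append] at h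
        exact absurd (List.cons_prefix_cons.mp h).1 hx
      · intro h; exact absurd h (by simp)
  | cons a U' ih =>
    intro t Y hU ht
    obtain ⟨ha, hU'⟩ : a ≠ c ∧ c ∉ U' := by simpa [not_or, eq_comm] using hU
    rcases t with _ | ⟨x, t'⟩
    · constructor
      · intro h
        rw [List.cons_append, List.nil_append] at h
        exact absurd (List.cons_prefix_cons.mp h).1 ha
      · intro h; exact absurd h (by simp)
    · obtain ⟨hx, ht'⟩ : c ≠ x ∧ c ∉ t' := by simpa [not_or] using ht
      constructor
      · intro h
        rw [List.cons_append, List.cons_append] at h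
        obtain ⟨rfl, h2⟩ := List.cons_prefix_cons.mp h
        rw [(ih t' Y hU' ht').mp h2]
      · intro h
        rw [h]
        exact ⟨Y, by simp⟩

theorem suffix_sep_iff (c : Char) (U s X : List Char) (hU : c ∉ U) (hs : c ∉ s) :
    c :: U <:+ X ++ c :: s ↔ U = s := by
  rw [← List.reverse_prefix]
  have h1 : (c::U).reverse = U.reverse ++ [c] := by simp
  have h2 : (X ++ c :: s).reverse = s.reverse ++ c :: X.reverse := by simp
  rw [h1, h2, prefix_sep_iff c _ _ _ (by simpa using hU) (by simpa using hs)]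
  exact ⟨fun h => by simpa using congrArg List.reverse h, fun h => by simp [h]⟩

-- per-piece edits corresponding to one literal replace pass
def eL (pat rep p : List Char) : List Char :=
  if pat.isPrefixOf p then rep ++ p.drop pat.length else p

def eR (d : Char) (p' nrep f : List Char) : List Char :=
  if (d::p').isSuffixOf f then f.take (f.length - (p'.length+1)) ++ nrep else f

theorem flatMap_sep_shape (c : Char) (rest : List (List Char)) :
    rest.flatMap (fun q => c :: q) = [] ∨ ∃ Y, rest.flatMap (fun q => c :: q) = c :: Y := by
  rcases rest with _ | ⟨r, rest'⟩
  · left; rfl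
  · right; exact ⟨r ++ rest'.flatMap (fun q => c :: q), by simp⟩

theorem repl1_left_step (pat rep f R : List Char)
    (hf : ' ' ∉ f) (hpat : ' ' ∉ pat) (hR : R = [] ∨ ∃ Y, R = ' '::Y) :
    repl1 ' ' pat (' '::rep) (' ' :: (f ++ R))
      = ' ' :: (eL pat rep f ++ repl1 ' ' pat (' '::rep) R) := by
  rw [repl1]
  by_cases hm : pat <+: f
  · rw [if_pos]
    · have hdrop : (f ++ R).drop pat.length = f.drop pat.length ++ R := by
        rw [List.drop_append_of_le_length hm.length_le]
      rw [hdrop, repl1_walk _ _ _ _ _ (fun hmem => hf (List.mem_of_mem_drop hmem))]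
      rw [eL, if_pos (List.isPrefixOf_iff_prefix.mpr hm)]
      simp
  -- the guard of repl1
    · rw [List.isPrefixOf_iff_prefix, List.cons_prefix_cons]
      exact ⟨rfl, (prefix_append_sep ' ' pat f R hpat hf hR).mpr hm⟩
  · rw [if_neg]
    · rw [repl1_walk _ _ _ _ _ hf, eL, if_neg (fun hp => hm (List.isPrefixOf_iff_prefix.mp hp))]
    · rw [List.isPrefixOf_iff_prefix, List.cons_prefix_cons]
      rintro ⟨-, hp⟩
      exact hm ((prefix_append_sep ' ' pat f R hpat hf hR).mp hp)

theorem repl1_left_flat (pat rep : List Char) (hpat : ' ' ∉ pat) (rest : List (List Char))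
    (hrest : ∀ p ∈ rest, ' ' ∉ p) :
    repl1 ' ' pat (' '::rep) (rest.flatMap (fun q => ' ' :: q))
      = (rest.map (eL pat rep)).flatMap (fun q => ' ' :: q) := by
  induction rest with
  | nil => simp
  | cons r rest' ih =>
    have h1 : ' ' ∉ r := hrest r (List.mem_cons_self ..)
    have h2 : ∀ p ∈ rest', ' ' ∉ p := fun p hp => hrest p (List.mem_cons_of_mem _ hp)
    rw [List.flatMap_cons, List.cons_append,
        repl1_left_step pat rep r _ h1 hpat (flatMap_sep_shape ' ' rest'), ih h2]
    simp

theorem repl1_left (pat rep p0 : List Char) (rest : List (List Char))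
    (hpat : ' ' ∉ pat) (hp0 : ' ' ∉ p0) (hrest : ∀ p ∈ rest, ' ' ∉ p) :
    repl1 ' ' pat (' '::rep) (myJoin ' ' (p0 :: rest))
      = myJoin ' ' (p0 :: rest.map (eL pat rep)) := by
  show repl1 ' ' pat (' '::rep) (p0 ++ rest.flatMap (fun q => ' '::q)) = _
  rw [repl1_walk _ _ _ _ _ hp0, repl1_left_flat pat rep hpat rest hrest]
  rfl

theorem repl1_right_step (d : Char) (p' nrep f R : List Char)
    (hd : d ≠ ' ') (hp' : ' ' ∉ d::p') (hf : ' ' ∉ f) :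
    repl1 d (p'++[' ']) (nrep++[' ']) (f ++ ' ' :: R)
      = eR d p' nrep f ++ ' ' :: repl1 d (p'++[' ']) (nrep++[' ']) R := by
  induction f with
  | nil =>
    rw [List.nil_append, repl1, if_neg, eR, if_neg (by simp)]
    · simp
    · rw [List.isPrefixOf_iff_prefix, List.cons_prefix_cons]
      rintro ⟨h, -⟩
      exact hd h
  | cons a f' ih =>
    obtain ⟨ha, hf'⟩ : ' ' ≠ a ∧ ' ' ∉ f' := by simpa [not_or] using hf
    have hiff : (d::p') ++ [' '] <+: (a::f') ++ ' '::R ↔ d::p' = a::f' :=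
      prefix_sep_iff ' ' (d::p') (a::f') R hp' hf
    by_cases hm : d :: p' = a :: f'
    · rw [List.cons_append, repl1, if_pos]
      · have hlen : p'.length = f'.length := by
          have := congrArg List.length hm; simpa using this
        have hdrop : (f' ++ ' '::R).drop (p'++[' ']).length = R := by
          rw [List.length_append, List.length_singleton, hlen]
          rw [show f'.length + 1 = (f' ++ [' ']).length by simp]
          rw [show f' ++ ' '::R = (f' ++ [' ']) ++ R by simp]
          rw [List.drop_left]
        rw [hdrop, eR, if_pos (by rw [hm]; exact List.isSuffixOf_iff_suffix.mpr (List.suffix_refl _))]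
        have h0 : (a::f').length - (p'.length + 1) = 0 := by simp [hlen]
        rw [h0, List.take_zero]
        simp
      · rw [List.isPrefixOf_iff_prefix]
        exact hiff.mpr hm
    · have hguard : ¬ ((d :: (p'++[' '])).isPrefixOf (a :: (f' ++ ' '::R)) = true) := by
        rw [List.isPrefixOf_iff_prefix]
        exact fun hx => hm (hiff.mp hx)
      rw [List.cons_append, repl1, if_neg hguard, ih hf']
      have hsuf : ((d::p').isSuffixOf (a :: f')) = ((d::p').isSuffixOf f') := by
        rcases hsb : (d::p').isSuffixOf f' with _ | _
        · rcases hsa : (d::p').isSuffixOf (a::f') with _ | _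
          · rfl
          · exfalso
            rcases List.suffix_cons_iff.mp (List.isSuffixOf_iff_suffix.mp hsa) with h | h
            · exact hm h
            · rw [← List.isSuffixOf_iff_suffix] at h
              simp [h] at hsb
        · rw [List.isSuffixOf_iff_suffix] at hsb ⊢
          simp [List.suffix_cons_iff, hsb]
      rcases hsb : (d::p').isSuffixOf f' with _ | _
      · simp only [eR, hsuf, hsb, if_neg]
        simp
      · have hsfx := List.isSuffixOf_iff_suffix.mp hsb
        have hlen : p'.length + 1 ≤ f'.length := by
          have := hsfx.length_le; simpa using this
        simp only [eR, hsuf, hsb, if_pos]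
        have h1 : (a::f').length - (p'.length + 1) = (f'.length - (p'.length+1)) + 1 := by
          simp only [List.length_cons]; omega
        rw [h1, List.take_succ_cons]
        simp

theorem repl1_right (d : Char) (p' nrep q : List Char) (front : List (List Char))
    (hd : d ≠ ' ') (hp' : ' ' ∉ d::p') (hq : ' ' ∉ q) (hfront : ∀ p ∈ front, ' ' ∉ p) :
    repl1 d (p'++[' ']) (nrep++[' ']) (myJoin ' ' (front ++ [q]))
      = myJoin ' ' (front.map (eR d p' nrep) ++ [q]) := by
  induction front with
  | nil =>
    show repl1 d (p'++[' ']) (nrep++[' ']) (myJoin ' ' [q]) = myJoin ' ' [q]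
    have hj : myJoin ' ' [q] = q := by simp [myJoin]
    rw [hj]
    exact repl1_id_of_not_mem d ' ' _ _ q (by simp) hq
  | cons f front' ih =>
    have h1 : ' ' ∉ f := hfront f (List.mem_cons_self ..)
    have h2 : ∀ p ∈ front', ' ' ∉ p := fun p hp => hfront p (List.mem_cons_of_mem _ hp)
    rw [List.cons_append, myJoin_cons_ne_nil _ _ _ (by simp),
        repl1_right_step d p' nrep f _ hd hp' h1, ih h2,
        List.map_cons, List.cons_append, myJoin_cons_ne_nil _ _ _ (by simp)]

-- the four replace passes of one unit, at the char-list level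
def r4c (U lo cs : List Char) : List Char :=
  repl1 '/' ('_'::U++[' ']) ('/'::(lo++[' ']))
    (repl1 '/' (U++[' ']) ('/'::(lo++[' ']))
      (repl1 ' ' (U++['_','/']) (' '::(lo++['/']))
        (repl1 ' ' (U++['/']) (' '::(lo++['/'])) cs)))

-- combined per-piece edits of one unit
def uL (U lo p : List Char) : List Char :=
  eL (U++['_','/']) (lo++['/']) (eL (U++['/']) (lo++['/']) p)
def uR (U lo f : List Char) : List Char :=
  eR '/' ('_'::U) ('/'::lo) (eR '/' U ('/'::lo) f)
def uB (U lo p : List Char) : List Char := uR U lo (uL U lo p)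

theorem pvNotMemApp {c : Char} {a b : List Char} (h1 : c ∉ a) (h2 : c ∉ b) : c ∉ a ++ b := by
  intro h; rcases List.mem_append.mp h with h | h
  · exact h1 h
  · exact h2 h

theorem pvNotMemCons {c d : Char} {l : List Char} (h1 : c ≠ d) (h2 : c ∉ l) : c ∉ d :: l := by
  intro h; rcases List.mem_cons.mp h with h | h
  · exact h1 h
  · exact h2 h

theorem eL_spfree (pat rep p : List Char) (hrep : ' ' ∉ rep) (hp : ' ' ∉ p) :
    ' ' ∉ eL pat rep p := by
  rw [eL]
  split_ifs with h
  · exact pvNotMemApp hrep (fun h1 => hp (List.mem_of_mem_drop h1))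
  · exact hp

theorem eR_spfree (d : Char) (p' nrep f : List Char) (hnrep : ' ' ∉ nrep) (hf : ' ' ∉ f) :
    ' ' ∉ eR d p' nrep f := by
  rw [eR]
  split_ifs with h
  · exact pvNotMemApp (fun h1 => hf (List.mem_of_mem_take h1)) hnrep
  · exact hf

theorem uL_spfree (U lo p : List Char) (hlo : ' ' ∉ lo) (hp : ' ' ∉ p) : ' ' ∉ uL U lo p :=
  eL_spfree _ _ _ (pvNotMemApp hlo (by decide)) (eL_spfree _ _ _ (pvNotMemApp hlo (by decide)) hp)
theorem uR_spfree (U lo p : List Char) (hlo : ' ' ∉ lo) (hp : ' ' ∉ p) : ' ' ∉ uR U lo p :=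
  eR_spfree _ _ _ _ (pvNotMemCons (by decide) hlo) (eR_spfree _ _ _ _ (pvNotMemCons (by decide) hlo) hp)
theorem uB_spfree (U lo p : List Char) (hlo : ' ' ∉ lo) (hp : ' ' ∉ p) : ' ' ∉ uB U lo p :=
  uR_spfree _ _ _ hlo (uL_spfree _ _ _ hlo hp)

theorem r4c_single (U lo p : List Char) (hU : ' ' ∉ U) (hlo : ' ' ∉ lo) (hp : ' ' ∉ p) :
    r4c U lo (myJoin ' ' [p]) = myJoin ' ' [p] := by
  rw [r4c]
  rw [repl1_left (U++['/']) (lo++['/']) p [] (pvNotMemApp hU (by decide)) hp (by simp)]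
  simp only [List.map_nil]
  rw [repl1_left (U++['_','/']) (lo++['/']) p [] (pvNotMemApp hU (by decide)) hp (by simp)]
  simp only [List.map_nil]
  rw [show ('/'::(lo++[' '])) = ('/'::lo)++[' '] from rfl]
  rw [show (myJoin ' ' [p]) = myJoin ' ' ([] ++ [p]) from rfl]
  rw [repl1_right '/' U ('/'::lo) p [] (by decide) (pvNotMemCons (by decide) hU)
        hp (by simp)]
  simp only [List.map_nil, List.nil_append]
  rw [show ('_'::U++[' ']) = ('_'::U)++[' '] from rfl]
  rw [show (myJoin ' ' [p]) = myJoin ' ' ([] ++ [p]) from rfl]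
  rw [repl1_right '/' ('_'::U) ('/'::lo) p [] (by decide)
        (pvNotMemCons (by decide) (pvNotMemCons (by decide) hU)) hp (by simp)]
  simp

theorem r4c_multi (U lo p0 pl : List Char) (mid : List (List Char))
    (hU : ' ' ∉ U) (hlo : ' ' ∉ lo)
    (hp0 : ' ' ∉ p0) (hpl : ' ' ∉ pl) (hmid : ∀ p ∈ mid, ' ' ∉ p) :
    r4c U lo (myJoin ' ' (p0 :: (mid ++ [pl])))
      = myJoin ' ' (uR U lo p0 :: (mid.map (uB U lo) ++ [uL U lo pl])) := by
  have hrest : ∀ p ∈ mid ++ [pl], ' ' ∉ p := by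
    intro p hp
    rcases List.mem_append.mp hp with h | h
    · exact hmid p h
    · simp at h; subst h; exact hpl
  rw [r4c]
  rw [repl1_left (U++['/']) (lo++['/']) p0 (mid++[pl]) (pvNotMemApp hU (by decide)) hp0 hrest]
  have hrest1 : ∀ p ∈ (mid++[pl]).map (eL (U++['/']) (lo++['/'])), ' ' ∉ p := by
    intro p hp
    obtain ⟨q, hq, rfl⟩ := List.mem_map.mp hp
    exact eL_spfree _ _ _ (pvNotMemApp hlo (by decide)) (hrest q hq)
  rw [repl1_left (U++['_','/']) (lo++['/']) p0 _ (pvNotMemApp hU (by decide)) hp0 hrest1]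
  rw [List.map_map]
  have hmm : p0 :: (mid++[pl]).map (eL (U++['_','/']) (lo++['/']) ∘ eL (U++['/']) (lo++['/']))
      = (p0 :: mid.map (eL (U++['_','/']) (lo++['/']) ∘ eL (U++['/']) (lo++['/'])))
        ++ [uL U lo pl] := by
    simp [uL]
  rw [hmm]
  have hfront : ∀ p ∈ p0 :: mid.map (eL (U++['_','/']) (lo++['/']) ∘ eL (U++['/']) (lo++['/'])),
      ' ' ∉ p := by
    intro p hp
    rcases List.mem_cons.mp hp with rfl | hp
    · exact hp0
    · obtain ⟨q, hq, rfl⟩ := List.mem_map.mp hp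
      exact eL_spfree _ _ _ (pvNotMemApp hlo (by decide))
        (eL_spfree _ _ _ (pvNotMemApp hlo (by decide)) (hmid q hq))
  have hlast : ' ' ∉ uL U lo pl := uL_spfree _ _ _ hlo hpl
  rw [show ('/'::(lo++[' '])) = ('/'::lo)++[' '] from rfl]
  rw [repl1_right '/' U ('/'::lo) _ _ (by decide) (pvNotMemCons (by decide) hU) hlast hfront]
  have hfront2 : ∀ p ∈ (p0 :: mid.map (eL (U++['_','/']) (lo++['/']) ∘ eL (U++['/']) (lo++['/']))).map
      (eR '/' U ('/'::lo)), ' ' ∉ p := by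
    intro p hp
    obtain ⟨q, hq, rfl⟩ := List.mem_map.mp hp
    exact eR_spfree _ _ _ _ (pvNotMemCons (by decide) hlo) (hfront q hq)
  rw [show ('_'::U++[' ']) = ('_'::U)++[' '] from rfl]
  rw [repl1_right '/' ('_'::U) ('/'::lo) _ _ (by decide)
        (pvNotMemCons (by decide) (pvNotMemCons (by decide) hU)) hlast hfront2]
  congr 1
  simp only [List.map_cons, List.map_map, List.cons_append]
  congr 1

def foldA (us : List (List Char × List Char)) (cs : List Char) : List Char :=
  us.foldl (fun cs ul => r4c ul.1 ul.2 cs) cs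

def chainL (us : List (List Char × List Char)) (p : List Char) : List Char :=
  us.foldl (fun p ul => uL ul.1 ul.2 p) p
def chainR (us : List (List Char × List Char)) (p : List Char) : List Char :=
  us.foldl (fun p ul => uR ul.1 ul.2 p) p
def chainB (us : List (List Char × List Char)) (p : List Char) : List Char :=
  us.foldl (fun p ul => uB ul.1 ul.2 p) p

theorem foldA_single (us : List (List Char × List Char)) (p : List Char)
    (hus : ∀ ul ∈ us, ' ' ∉ ul.1 ∧ ' ' ∉ ul.2) (hp : ' ' ∉ p) :
    foldA us (myJoin ' ' [p]) = myJoin ' ' [p] := by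
  induction us with
  | nil => rfl
  | cons u us' ih =>
    have hu := hus u (List.mem_cons_self ..)
    show foldA us' (r4c u.1 u.2 (myJoin ' ' [p])) = myJoin ' ' [p]
    rw [r4c_single u.1 u.2 p hu.1 hu.2 hp]
    exact ih (fun ul hul => hus ul (List.mem_cons_of_mem _ hul))

theorem foldA_multi (us : List (List Char × List Char)) :
    ∀ (p0 pl : List Char) (mid : List (List Char)),
    (∀ ul ∈ us, ' ' ∉ ul.1 ∧ ' ' ∉ ul.2) → ' ' ∉ p0 → ' ' ∉ pl → (∀ p ∈ mid, ' ' ∉ p) →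
    foldA us (myJoin ' ' (p0 :: (mid ++ [pl])))
      = myJoin ' ' (chainR us p0 :: (mid.map (chainB us) ++ [chainL us pl])) := by
  induction us with
  | nil =>
    intro p0 pl mid _ _ _ _
    show myJoin ' ' (p0 :: (mid ++ [pl])) = myJoin ' ' (p0 :: (mid.map (chainB []) ++ [pl]))
    have : mid.map (chainB []) = mid := by
      apply List.map_id''
      intro p; rfl
    rw [this]
  | cons u us' ih =>
    intro p0 pl mid hus hp0 hpl hmid
    have hu := hus u (List.mem_cons_self ..)
    have hus' := fun ul hul => hus ul (List.mem_cons_of_mem _ hul)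
    show foldA us' (r4c u.1 u.2 (myJoin ' ' (p0 :: (mid ++ [pl]))))
      = myJoin ' ' (chainR (u::us') p0 :: (mid.map (chainB (u::us')) ++ [chainL (u::us') pl]))
    rw [r4c_multi u.1 u.2 p0 pl mid hu.1 hu.2 hp0 hpl hmid]
    rw [ih (uR u.1 u.2 p0) (uL u.1 u.2 pl) (mid.map (uB u.1 u.2)) hus'
          (uR_spfree _ _ _ hu.2 hp0) (uL_spfree _ _ _ hu.2 hpl)
          (by intro p hp
              obtain ⟨q, hq, rfl⟩ := List.mem_map.mp hp
              exact uB_spfree _ _ _ hu.2 (hmid q hq))]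
    rw [List.map_map]
    rfl

theorem eL_id_of_not_mem (a : Char) (pat rep p : List Char) (ha : a ∈ pat) (hp : a ∉ p) :
    eL pat rep p = p := by
  rw [eL, if_neg]
  intro h
  exact hp ((List.isPrefixOf_iff_prefix.mp h).subset ha)

theorem eR_id_of_not_mem (a d : Char) (p' nrep f : List Char) (ha : a ∈ d::p') (hf : a ∉ f) :
    eR d p' nrep f = f := by
  rw [eR, if_neg]
  intro h
  exact hf ((List.isSuffixOf_iff_suffix.mp h).subset ha)

theorem uL_id (U lo p : List Char) (hp : '/' ∉ p) : uL U lo p = p := by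
  rw [uL, eL_id_of_not_mem '/' _ _ _ (by simp) hp, eL_id_of_not_mem '/' _ _ _ (by simp) hp]

theorem uR_id (U lo p : List Char) (hp : '/' ∉ p) : uR U lo p = p := by
  rw [uR, eR_id_of_not_mem '/' _ _ _ _ (by simp) hp, eR_id_of_not_mem '/' _ _ _ _ (by simp) hp]

-- per-piece per-unit edits on the slash decomposition
def LstepP (U lo t : List Char) : List Char :=
  if t = U then lo else if t = U ++ ['_'] then lo else t
def RstepP (U lo s : List Char) : List Char :=
  if s = U then lo else if s = '_'::U then lo else s

theorem drop_tok (z Y : List Char) (c : Char) : (z ++ c :: Y).drop (z.length + 1) = Y := by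
  rw [show z ++ c::Y = (z ++ [c]) ++ Y by simp,
      show z.length + 1 = (z ++ [c]).length by simp, List.drop_left]

theorem uL_join (U lo t : List Char) (rest : List (List Char)) (hrest : rest ≠ [])
    (hU : '/' ∉ U) (ht : '/' ∉ t) (hlo : '/' ∉ lo) (hne : lo ≠ U ++ ['_']) :
    uL U lo (myJoin '/' (t :: rest)) = myJoin '/' (LstepP U lo t :: rest) := by
  rw [myJoin_cons_ne_nil _ _ _ hrest, myJoin_cons_ne_nil _ _ _ hrest]
  set Y := myJoin '/' rest with hY
  by_cases h1 : t = U
  · have hinner : eL (U++['/']) (lo++['/']) (t ++ '/' :: Y) = lo ++ '/' :: Y := by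
      rw [eL, if_pos]
      · rw [show (U++['/']).length = U.length + 1 by simp, ← h1, drop_tok]
        simp
      · rw [List.isPrefixOf_iff_prefix, prefix_sep_iff '/' U t Y hU ht]
        exact h1.symm
    have houter : eL (U++['_','/']) (lo++['/']) (lo ++ '/' :: Y) = lo ++ '/' :: Y := by
      rw [eL, if_neg]
      rw [List.isPrefixOf_iff_prefix, show U ++ ['_','/'] = (U++['_']) ++ ['/'] by simp,
          prefix_sep_iff '/' (U++['_']) lo Y (pvNotMemApp hU (by decide)) hlo]
      exact fun h => hne h.symm
    rw [uL, hinner, houter, LstepP, if_pos h1]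
  · have hinner : eL (U++['/']) (lo++['/']) (t ++ '/'::Y) = t ++ '/'::Y := by
      rw [eL, if_neg]
      rw [List.isPrefixOf_iff_prefix, prefix_sep_iff '/' U t Y hU ht]
      exact fun h => h1 h.symm
    by_cases h2 : t = U ++ ['_']
    · have houter : eL (U++['_','/']) (lo++['/']) (t ++ '/'::Y) = lo ++ '/'::Y := by
        rw [eL, if_pos]
        · rw [show (U++['_','/']).length = (U++['_']).length + 1 by simp, ← h2, drop_tok]
          simp
        · rw [List.isPrefixOf_iff_prefix, show U ++ ['_','/'] = (U++['_'])++['/'] by simp,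
              prefix_sep_iff '/' (U++['_']) t Y (pvNotMemApp hU (by decide)) ht]
          exact h2.symm
      rw [uL, hinner, houter, LstepP, if_neg h1, if_pos h2]
    · have houter : eL (U++['_','/']) (lo++['/']) (t ++ '/'::Y) = t ++ '/'::Y := by
        rw [eL, if_neg]
        rw [List.isPrefixOf_iff_prefix, show U ++ ['_','/'] = (U++['_'])++['/'] by simp,
            prefix_sep_iff '/' (U++['_']) t Y (pvNotMemApp hU (by decide)) ht]
        exact fun h => h2 h.symm
      rw [uL, hinner, houter, LstepP, if_neg h1, if_neg h2]

theorem uR_join (U lo s : List Char) (front : List (List Char)) (hfront : front ≠ [])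
    (hU : '/' ∉ U) (hs : '/' ∉ s) (hlo : '/' ∉ lo) (hne : lo ≠ '_'::U) :
    uR U lo (myJoin '/' (front ++ [s])) = myJoin '/' (front ++ [RstepP U lo s]) := by
  rw [myJoin_append_singleton _ _ _ hfront, myJoin_append_singleton _ _ _ hfront]
  set X := myJoin '/' front with hX
  by_cases h1 : s = U
  · have hinner : eR '/' U ('/'::lo) (X ++ '/'::s) = X ++ '/'::lo := by
      rw [eR, if_pos]
      · rw [show (X ++ '/'::s).length - (U.length + 1) = X.length by
              simp [show U.length = s.length by rw [h1]]]
        rw [List.take_left' rfl]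
      · rw [List.isSuffixOf_iff_suffix, suffix_sep_iff '/' U s X hU hs]
        exact h1.symm
    have houter : eR '/' ('_'::U) ('/'::lo) (X ++ '/'::lo) = X ++ '/'::lo := by
      rw [eR, if_neg]
      rw [List.isSuffixOf_iff_suffix,
          suffix_sep_iff '/' ('_'::U) lo X (pvNotMemCons (by decide) hU) hlo]
      exact fun h => hne h.symm
    rw [uR, hinner, houter, RstepP, if_pos h1]
  · have hinner : eR '/' U ('/'::lo) (X ++ '/'::s) = X ++ '/'::s := by
      rw [eR, if_neg]
      rw [List.isSuffixOf_iff_suffix, suffix_sep_iff '/' U s X hU hs]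
      exact fun h => h1 h.symm
    by_cases h2 : s = '_'::U
    · have houter : eR '/' ('_'::U) ('/'::lo) (X ++ '/'::s) = X ++ '/'::lo := by
        rw [eR, if_pos]
        · rw [show (X ++ '/'::s).length - (('_'::U).length + 1) = X.length by
                simp [show ('_'::U : List Char).length = s.length by rw [h2]]]
          rw [List.take_left' rfl]
        · rw [List.isSuffixOf_iff_suffix,
              suffix_sep_iff '/' ('_'::U) s X (pvNotMemCons (by decide) hU) hs]
          exact h2.symm
      rw [uR, hinner, houter, RstepP, if_neg h1, if_pos h2]
    · have houter : eR '/' ('_'::U) ('/'::lo) (X ++ '/'::s) = X ++ '/'::s := by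
        rw [eR, if_neg]
        rw [List.isSuffixOf_iff_suffix,
            suffix_sep_iff '/' ('_'::U) s X (pvNotMemCons (by decide) hU) hs]
        exact fun h => h2 h.symm
      rw [uR, hinner, houter, RstepP, if_neg h1, if_neg h2]

def LfoldP (us : List (List Char × List Char)) (t : List Char) : List Char :=
  us.foldl (fun t ul => LstepP ul.1 ul.2 t) t
def RfoldP (us : List (List Char × List Char)) (s : List Char) : List Char :=
  us.foldl (fun s ul => RstepP ul.1 ul.2 s) s

def GoodUnit (ul : List Char × List Char) : Prop :=
  ' ' ∉ ul.1 ∧ ' ' ∉ ul.2 ∧ '/' ∉ ul.1 ∧ '/' ∉ ul.2 ∧ ul.2 ≠ ul.1 ++ ['_'] ∧ ul.2 ≠ '_'::ul.1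

theorem chainL_id (us : List (List Char × List Char)) (p : List Char) (hp : '/' ∉ p) :
    chainL us p = p := by
  induction us with
  | nil => rfl
  | cons u us' ih => show chainL us' (uL u.1 u.2 p) = p; rw [uL_id _ _ _ hp]; exact ih
theorem chainR_id (us : List (List Char × List Char)) (p : List Char) (hp : '/' ∉ p) :
    chainR us p = p := by
  induction us with
  | nil => rfl
  | cons u us' ih => show chainR us' (uR u.1 u.2 p) = p; rw [uR_id _ _ _ hp]; exact ih
theorem chainB_id (us : List (List Char × List Char)) (p : List Char) (hp : '/' ∉ p) :
    chainB us p = p := by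
  induction us with
  | nil => rfl
  | cons u us' ih =>
    show chainB us' (uB u.1 u.2 p) = p
    rw [uB, uL_id _ _ _ hp, uR_id _ _ _ hp]; exact ih

theorem LstepP_slfree (U lo t : List Char) (hlo : '/' ∉ lo) (ht : '/' ∉ t) :
    '/' ∉ LstepP U lo t := by
  rw [LstepP]; split_ifs <;> assumption
theorem RstepP_slfree (U lo s : List Char) (hlo : '/' ∉ lo) (hs : '/' ∉ s) :
    '/' ∉ RstepP U lo s := by
  rw [RstepP]; split_ifs <;> assumption

theorem chainL_join (us : List (List Char × List Char)) (hus : ∀ ul ∈ us, GoodUnit ul) :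
    ∀ (t : List Char) (rest : List (List Char)), rest ≠ [] → '/' ∉ t →
    chainL us (myJoin '/' (t :: rest)) = myJoin '/' (LfoldP us t :: rest) := by
  induction us with
  | nil => intro t rest _ _; rfl
  | cons u us' ih =>
    intro t rest hrest ht
    obtain ⟨_, _, hU, hlo, hne1, _⟩ := hus u (List.mem_cons_self ..)
    show chainL us' (uL u.1 u.2 (myJoin '/' (t :: rest))) = _
    rw [uL_join u.1 u.2 t rest hrest hU ht hlo hne1]
    rw [ih (fun ul hul => hus ul (List.mem_cons_of_mem _ hul)) _ rest hrest
          (LstepP_slfree _ _ _ hlo ht)]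
    rfl

theorem chainR_join (us : List (List Char × List Char)) (hus : ∀ ul ∈ us, GoodUnit ul) :
    ∀ (s : List Char) (front : List (List Char)), front ≠ [] → '/' ∉ s →
    chainR us (myJoin '/' (front ++ [s])) = myJoin '/' (front ++ [RfoldP us s]) := by
  induction us with
  | nil => intro s front _ _; rfl
  | cons u us' ih =>
    intro s front hfront hs
    obtain ⟨_, _, hU, hlo, _, hne2⟩ := hus u (List.mem_cons_self ..)
    show chainR us' (uR u.1 u.2 (myJoin '/' (front ++ [s]))) = _
    rw [uR_join u.1 u.2 s front hfront hU hs hlo hne2]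
    rw [ih (fun ul hul => hus ul (List.mem_cons_of_mem _ hul)) _ front hfront
          (RstepP_slfree _ _ _ hlo hs)]
    rfl

theorem chainB_join (us : List (List Char × List Char)) (hus : ∀ ul ∈ us, GoodUnit ul) :
    ∀ (t s : List Char) (mid : List (List Char)), '/' ∉ t → '/' ∉ s →
    chainB us (myJoin '/' (t :: (mid ++ [s]))) = myJoin '/' (LfoldP us t :: (mid ++ [RfoldP us s])) := by
  induction us with
  | nil => intro t s mid _ _; rfl
  | cons u us' ih =>
    intro t s mid ht hs
    obtain ⟨_, _, hU, hlo, hne1, hne2⟩ := hus u (List.mem_cons_self ..)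
    show chainB us' (uB u.1 u.2 (myJoin '/' (t :: (mid ++ [s])))) = _
    rw [uB, uL_join u.1 u.2 t _ (by simp) hU ht hlo hne1]
    rw [show (LstepP u.1 u.2 t :: (mid ++ [s])) = (LstepP u.1 u.2 t :: mid) ++ [s] from rfl]
    rw [uR_join u.1 u.2 s _ (by simp) hU hs hlo hne2]
    rw [show ((LstepP u.1 u.2 t :: mid) ++ [RstepP u.1 u.2 s])
          = LstepP u.1 u.2 t :: (mid ++ [RstepP u.1 u.2 s]) from rfl]
    rw [ih (fun ul hul => hus ul (List.mem_cons_of_mem _ hul)) _ _ mid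
          (LstepP_slfree _ _ _ hlo ht) (RstepP_slfree _ _ _ hlo hs)]
    rfl

-- dictionary-lookup forms of the per-piece chains
def lookL (K : List (List Char)) (t : List Char) : List Char :=
  if t ∈ K then PySem.Chars.lower t
  else if t.getLast? = some '_' ∧ t.dropLast ∈ K then PySem.Chars.lower t.dropLast
  else t
def lookR (K : List (List Char)) (s : List Char) : List Char :=
  if s ∈ K then PySem.Chars.lower s
  else if s.head? = some '_' ∧ s.tail ∈ K then PySem.Chars.lower s.tail
  else s

theorem LfoldP_inert (us : List (List Char × List Char)) (x : List Char)
    (h : ∀ ul ∈ us, x ≠ ul.1 ∧ x ≠ ul.1 ++ ['_']) : LfoldP us x = x := by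
  induction us with
  | nil => rfl
  | cons u us' ih =>
    obtain ⟨h1, h2⟩ := h u (List.mem_cons_self ..)
    show LfoldP us' (LstepP u.1 u.2 x) = x
    rw [LstepP, if_neg h1, if_neg h2]
    exact ih (fun ul hul => h ul (List.mem_cons_of_mem _ hul))

theorem RfoldP_inert (us : List (List Char × List Char)) (x : List Char)
    (h : ∀ ul ∈ us, x ≠ ul.1 ∧ x ≠ '_'::ul.1) : RfoldP us x = x := by
  induction us with
  | nil => rfl
  | cons u us' ih =>
    obtain ⟨h1, h2⟩ := h u (List.mem_cons_self ..)
    show RfoldP us' (RstepP u.1 u.2 x) = x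
    rw [RstepP, if_neg h1, if_neg h2]
    exact ih (fun ul hul => h ul (List.mem_cons_of_mem _ hul))

theorem tok_eq {t : List Char} {c : Char} (h : t.getLast? = some c) : t.dropLast ++ [c] = t := by
  induction t with
  | nil => simp at h
  | cons a t' ih =>
    rcases t' with _ | ⟨b, t''⟩
    · simp at h; simp [h]
    · rw [List.getLast?_cons_cons] at h
      simp [ih h]

def GoodVals (us : List (List Char × List Char)) : Prop :=
  ∀ ul ∈ us, ul.2 = PySem.Chars.lower ul.1 ∧ ul.1.getLast? ≠ some '_' ∧ ul.1.head? ≠ some '_'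
def GoodInert (us : List (List Char × List Char)) : Prop :=
  ∀ ul ∈ us, ∀ ul' ∈ us, ul.2 ≠ ul'.1 ∧ ul.2 ≠ ul'.1 ++ ['_'] ∧ ul.2 ≠ '_'::ul'.1

theorem LfoldP_eq_lookL (us : List (List Char × List Char))
    (hv : GoodVals us) (hi : GoodInert us) :
    ∀ t, LfoldP us t = lookL (us.map (·.1)) t := by
  induction us with
  | nil => intro t; simp [LfoldP, lookL]
  | cons u us' ih =>
    intro t
    have hv' : GoodVals us' := fun ul hul => hv ul (List.mem_cons_of_mem _ hul)
    have hi' : GoodInert us' := fun ul hul ul' hul' =>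
      hi ul (List.mem_cons_of_mem _ hul) ul' (List.mem_cons_of_mem _ hul')
    obtain ⟨hval, hkey, -⟩ := hv u (List.mem_cons_self ..)
    show LfoldP us' (LstepP u.1 u.2 t) = lookL (u.1 :: us'.map (·.1)) t
    by_cases h1 : t = u.1
    · rw [LstepP, if_pos h1]
      rw [LfoldP_inert us' u.2 (fun ul hul =>
            ⟨(hi u (List.mem_cons_self ..) ul (List.mem_cons_of_mem _ hul)).1,
             (hi u (List.mem_cons_self ..) ul (List.mem_cons_of_mem _ hul)).2.1⟩)]
      rw [lookL, if_pos (by rw [h1]; exact List.mem_cons_self ..), h1, hval]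
    · by_cases h2 : t = u.1 ++ ['_']
      · rw [LstepP, if_neg h1, if_pos h2]
        rw [LfoldP_inert us' u.2 (fun ul hul =>
              ⟨(hi u (List.mem_cons_self ..) ul (List.mem_cons_of_mem _ hul)).1,
               (hi u (List.mem_cons_self ..) ul (List.mem_cons_of_mem _ hul)).2.1⟩)]
        have hlast : t.getLast? = some '_' := by rw [h2]; simp
        have hdrop : t.dropLast = u.1 := by rw [h2]; simp
        have hnot : t ∉ u.1 :: us'.map (·.1) := by
          intro hmem
          rcases List.mem_cons.mp hmem with h | h
          · exact h1 h
          · obtain ⟨ul, hul, hul1⟩ := List.mem_map.mp h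
            exact (hv ul (List.mem_cons_of_mem _ hul)).2.1 (hul1 ▸ hlast)
        rw [lookL, if_neg hnot, if_pos ⟨hlast, by rw [hdrop]; exact List.mem_cons_self ..⟩, hdrop, hval]
      · rw [LstepP, if_neg h1, if_neg h2, ih hv' hi' t]
        rw [lookL, lookL]
        by_cases hm : t ∈ us'.map (·.1)
        · rw [if_pos hm, if_pos (List.mem_cons_of_mem _ hm)]
        · have hnotc : t ∉ u.1 :: us'.map (·.1) := by
            intro hmem
            rcases List.mem_cons.mp hmem with h | h
            · exact h1 h
            · exact hm h
          rw [if_neg hm, if_neg hnotc]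
          by_cases hd : t.getLast? = some '_' ∧ t.dropLast ∈ us'.map (·.1)
          · rw [if_pos hd, if_pos ⟨hd.1, List.mem_cons_of_mem _ hd.2⟩]
          · have hnotd : ¬(t.getLast? = some '_' ∧ t.dropLast ∈ u.1 :: us'.map (·.1)) := by
              rintro ⟨hA, hB⟩
              rcases List.mem_cons.mp hB with h | h
              · exact h2 (by rw [← tok_eq hA, h])
              · exact hd ⟨hA, h⟩
            rw [if_neg hd, if_neg hnotd]

theorem RfoldP_eq_lookR (us : List (List Char × List Char))
    (hv : GoodVals us) (hi : GoodInert us) :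
    ∀ s, RfoldP us s = lookR (us.map (·.1)) s := by
  induction us with
  | nil => intro s; simp [RfoldP, lookR]
  | cons u us' ih =>
    intro t
    have hv' : GoodVals us' := fun ul hul => hv ul (List.mem_cons_of_mem _ hul)
    have hi' : GoodInert us' := fun ul hul ul' hul' =>
      hi ul (List.mem_cons_of_mem _ hul) ul' (List.mem_cons_of_mem _ hul')
    obtain ⟨hval, -, hkey⟩ := hv u (List.mem_cons_self ..)
    show RfoldP us' (RstepP u.1 u.2 t) = lookR (u.1 :: us'.map (·.1)) t
    by_cases h1 : t = u.1
    · rw [RstepP, if_pos h1]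
      rw [RfoldP_inert us' u.2 (fun ul hul =>
            ⟨(hi u (List.mem_cons_self ..) ul (List.mem_cons_of_mem _ hul)).1,
             (hi u (List.mem_cons_self ..) ul (List.mem_cons_of_mem _ hul)).2.2⟩)]
      rw [lookR, if_pos (by rw [h1]; exact List.mem_cons_self ..), h1, hval]
    · by_cases h2 : t = '_'::u.1
      · rw [RstepP, if_neg h1, if_pos h2]
        rw [RfoldP_inert us' u.2 (fun ul hul =>
              ⟨(hi u (List.mem_cons_self ..) ul (List.mem_cons_of_mem _ hul)).1,
               (hi u (List.mem_cons_self ..) ul (List.mem_cons_of_mem _ hul)).2.2⟩)]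
        have hhead : t.head? = some '_' := by rw [h2]; rfl
        have htail : t.tail = u.1 := by rw [h2]; rfl
        have hnot : t ∉ u.1 :: us'.map (·.1) := by
          intro hmem
          rcases List.mem_cons.mp hmem with h | h
          · exact h1 h
          · obtain ⟨ul, hul, hul1⟩ := List.mem_map.mp h
            exact (hv ul (List.mem_cons_of_mem _ hul)).2.2 (hul1 ▸ hhead)
        rw [lookR, if_neg hnot, if_pos ⟨hhead, by rw [htail]; exact List.mem_cons_self ..⟩, htail, hval]
      · rw [RstepP, if_neg h1, if_neg h2, ih hv' hi' t]
        rw [lookR, lookR]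
        by_cases hm : t ∈ us'.map (·.1)
        · rw [if_pos hm, if_pos (List.mem_cons_of_mem _ hm)]
        · have hnotc : t ∉ u.1 :: us'.map (·.1) := by
            intro hmem
            rcases List.mem_cons.mp hmem with h | h
            · exact h1 h
            · exact hm h
          rw [if_neg hm, if_neg hnotc]
          by_cases hd : t.head? = some '_' ∧ t.tail ∈ us'.map (·.1)
          · rw [if_pos hd, if_pos ⟨hd.1, List.mem_cons_of_mem _ hd.2⟩]
          · have hnotd : ¬(t.head? = some '_' ∧ t.tail ∈ u.1 :: us'.map (·.1)) := by
              rintro ⟨hA, hB⟩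
              rcases List.mem_cons.mp hB with h | h
              · refine h2 ?_
                rcases t with _ | ⟨a, t'⟩
                · simp at hA
                · simp at hA
                  rw [hA]
                  simpa using h
              · exact hd ⟨hA, h⟩
            rw [if_neg hd, if_neg hnotd]

theorem dict_get_fn (f : String → String) :
    ∀ (items : List (String × String)), (∀ kv ∈ items, kv.2 = f kv.1) →
    ∀ k : String, (PySem.Dict.mk items).get? k
      = if k ∈ items.map Prod.fst then some (f k) else none := by
  intro items
  induction items with
  | nil => intro _ k; simp [PySem.Dict.get?]
  | cons kv rest ih =>
    intro h k
    have hkv := h kv (List.mem_cons_self ..)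
    by_cases he : kv.1 = k
    · rw [show (PySem.Dict.mk (kv :: rest)).get? k
          = ((kv :: rest).find? (fun p => p.1 == k)).map (·.2) from rfl]
      rw [List.find?_cons_of_pos (by simp [he])]
      simp [he ▸ hkv, ← he]
    · rw [show (PySem.Dict.mk (kv :: rest)).get? k
          = ((kv :: rest).find? (fun p => p.1 == k)).map (·.2) from rfl]
      rw [List.find?_cons_of_neg (by simp [he])]
      rw [show (List.find? (fun p => p.1 == k) rest).map (·.2)
          = (PySem.Dict.mk rest).get? k from rfl]
      rw [ih (fun kv' h' => h kv' (List.mem_cons_of_mem _ h')) k]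
      have hiff : (k ∈ List.map Prod.fst (kv :: rest)) ↔ (k ∈ List.map Prod.fst rest) := by
        simp only [List.map_cons, List.mem_cons]
        exact ⟨fun h => h.resolve_left (fun hh => he hh.symm), Or.inr⟩
      rw [if_congr hiff rfl rfl]

theorem mapIdx_absent {α β : Type} (gmid glast : α → β) :
    ∀ (G : Nat → α → β) (mid : List α) (pl : α),
    (∀ i p, i < mid.length → G i p = gmid p) → (∀ p, G mid.length p = glast p) →
    List.mapIdx G (mid ++ [pl]) = mid.map gmid ++ [glast pl] := by
  intro G mid
  induction mid generalizing G with
  | nil =>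
    intro pl _ hlast
    have h0 := hlast pl
    simp only [List.length_nil] at h0
    simp [List.mapIdx_cons, h0]
  | cons m mid' ih =>
    intro pl hmid hlast
    rw [List.cons_append, List.mapIdx_cons]
    rw [ih (fun i => G (i+1)) pl
          (fun i p hi => hmid (i+1) p (by simpa using hi))
          (fun p => hlast p)]
    rw [hmid 0 m (by simp)]
    simp

theorem endswith_iff_getLast (t : List Char) :
    PySem.Chars.endswith t ['_'] = true ↔ t.getLast? = some '_' := by
  rw [PySem.Chars.endswith_iff]
  constructor
  · rintro ⟨l, rfl⟩
    simp
  · intro h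
    exact ⟨t.dropLast, tok_eq h⟩

theorem startswith_iff_head (t : List Char) :
    PySem.Chars.startswith t ['_'] = true ↔ t.head? = some '_' := by
  rw [PySem.Chars.startswith_iff]
  constructor
  · rintro ⟨l, rfl⟩
    simp
  · intro h
    rcases t with _ | ⟨a, t'⟩
    · simp at h
    · simp at h
      exact ⟨t', by rw [h]; rfl⟩

theorem slice_neg_one (l : List Char) : PySem.List.slice l none (some (-1)) = l.dropLast := by
  show List.take (PySem.List.clampIdx l.length (-1) - 0) (List.drop 0 l) = l.dropLast
  rcases l with _ | ⟨a, l'⟩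
  · rfl
  · have hc : PySem.List.clampIdx (a::l').length (-1) = (a::l').length - 1 := by
      rw [PySem.List.clampIdx, if_pos (by norm_num), if_neg (by simp)]
      omega
    rw [hc, List.drop_zero, List.dropLast_eq_take, Nat.sub_zero]

theorem slice_from_one (l : List Char) : PySem.List.slice l (some 1) none = l.tail := by
  rw [PySem.List.slice_from l (by norm_num)]
  simp

theorem pyget_neg_one (a b : List Char) (m : List (List Char)) :
    PySem.List.pyGet? (a :: (m ++ [b])) (-1) = some b := by
  rw [PySem.List.pyGet?, PySem.List.pyIdx?]
  rw [if_neg (by norm_num), if_pos (by simp)]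
  simp only [Option.bind_some]
  rw [show (a :: (m ++ [b])).length - ((- (-1) : Int)).toNat = (a::m).length by simp]
  rw [show a :: (m ++ [b]) = (a::m) ++ [b] from rfl]
  exact List.getElem?_concat_length

theorem set_last {α : Type} (s v : α) : ∀ (as : List α), (as ++ [s]).set as.length v = as ++ [v] := by
  intro as
  induction as with
  | nil => rfl
  | cons a as' ih => simpa using ih

def pairOf (u : String) : List Char × List Char :=
  ((PySem.Str.replace (PySem.Str.upper u) " " "_").toList,
   (PySem.Str.replace (PySem.Str.lower u) " " "_").toList)
def pvUs : List (List Char × List Char) := pvUnits.map pairOf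
def pvKeys : List (List Char) := pvUs.map (·.1)
def pvMapping : PySem.Dict String String :=
  pvUnits.foldl (fun m unit =>
    m.insert (PySem.Str.replace (PySem.Str.upper unit) " " "_")
             (PySem.Str.replace (PySem.Str.lower unit) " " "_")) ⟨[]⟩

set_option maxHeartbeats 1000000 in
theorem pvGoodUnits : ∀ ul ∈ pvUs, GoodUnit ul := by
  unfold GoodUnit; decide
set_option maxHeartbeats 1000000 in
theorem pvGoodVals : GoodVals pvUs := by
  unfold GoodVals; decide
set_option maxHeartbeats 4000000 in
theorem pvGoodInert : GoodInert pvUs := by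
  unfold GoodInert; decide
set_option maxHeartbeats 1000000 in
set_option maxRecDepth 40000 in
theorem pvMapVals : ∀ kv ∈ pvMapping.items, kv.2 = PySem.Str.lower kv.1 := by decide
set_option maxHeartbeats 1000000 in
set_option maxRecDepth 40000 in
theorem pvMapKeys1 : ∀ t ∈ pvMapping.items.map (fun kv => kv.1.toList), t ∈ pvKeys := by decide
set_option maxHeartbeats 1000000 in
set_option maxRecDepth 40000 in
theorem pvMapKeys2 : ∀ t ∈ pvKeys, t ∈ pvMapping.items.map (fun kv => kv.1.toList) := by decide

set_option maxRecDepth 40000 in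
theorem pvGet (t : List Char) :
    pvMapping.get? (String.ofList t)
      = if t ∈ pvKeys then some (PySem.Str.lower (String.ofList t)) else none := by
  have h := dict_get_fn PySem.Str.lower pvMapping.items pvMapVals (String.ofList t)
  rw [show PySem.Dict.mk pvMapping.items = pvMapping from rfl] at h
  rw [h]
  have hiff : (String.ofList t ∈ pvMapping.items.map Prod.fst) ↔ t ∈ pvKeys := by
    constructor
    · intro hm
      obtain ⟨kv, hkv, heq⟩ := List.mem_map.mp hm
      have ht : t = kv.1.toList := by rw [heq, String.toList_ofList]
      rw [ht]
      exact pvMapKeys1 _ (List.mem_map.mpr ⟨kv, hkv, rfl⟩)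
    · intro hm
      obtain ⟨kv, hkv, heq⟩ := List.mem_map.mp (pvMapKeys2 t hm)
      have : String.ofList t = kv.1 := by rw [← heq, String.ofList_toList]
      rw [this]
      exact List.mem_map.mpr ⟨kv, hkv, rfl⟩
  rw [if_congr hiff rfl rfl]

-- the per-piece body of B's loop, with the piece index conditions as parameters
def bfun (last k : Nat) (piece : List Char) : List Char :=
  let parts := PySem.Chars.splitOn piece ['/']
  if parts.length > 1 then
    let parts :=
      if 0 < k then
        let head := parts.getD 0 []
        match pvMapping.get? (String.ofList head) with
        | some v => parts.set 0 v.toList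
        | none =>
          if PySem.Chars.endswith head ['_'] then
            match pvMapping.get? (String.ofList (PySem.List.slice head none (some (-1)))) with
            | some v => parts.set 0 v.toList
            | none => parts
          else parts
      else parts
    let parts :=
      if k < last then
        let tl := (PySem.List.pyGet? parts (-1)).getD []
        match pvMapping.get? (String.ofList tl) with
        | some v => parts.set (parts.length - 1) v.toList
        | none =>
          if PySem.Chars.startswith tl ['_'] then
            match pvMapping.get? (String.ofList (PySem.List.slice tl (some 1) none)) with
            | some v => parts.set (parts.length - 1) v.toList
            | none => parts
          else parts
      else parts
    PySem.Chars.join ['/'] parts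
  else piece

theorem lower_toList (t : List Char) :
    (PySem.Str.lower (String.ofList t)).toList = PySem.Chars.lower t := by
  rw [PySem.Str.toList_lower, String.toList_ofList]

set_option maxRecDepth 40000 in
theorem headEdit_eval (t s : List Char) (mid2 : List (List Char)) :
    (match pvMapping.get? (String.ofList t) with
     | some v => (t :: (mid2 ++ [s])).set 0 v.toList
     | none =>
       if PySem.Chars.endswith t ['_'] then
         match pvMapping.get? (String.ofList (PySem.List.slice t none (some (-1)))) with
         | some v => (t :: (mid2 ++ [s])).set 0 v.toList
         | none => t :: (mid2 ++ [s])
       else t :: (mid2 ++ [s]))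
    = lookL pvKeys t :: (mid2 ++ [s]) := by
  rw [pvGet t]
  by_cases h1 : t ∈ pvKeys
  · rw [if_pos h1]
    show (t :: (mid2 ++ [s])).set 0 (PySem.Str.lower (String.ofList t)).toList = _
    rw [List.set_cons_zero, lower_toList, lookL, if_pos h1]
  · rw [if_neg h1]
    show (if PySem.Chars.endswith t ['_'] then _ else _) = _
    by_cases h2 : t.getLast? = some '_'
    · rw [if_pos ((endswith_iff_getLast t).mpr h2), slice_neg_one, pvGet t.dropLast]
      by_cases h3 : t.dropLast ∈ pvKeys
      · rw [if_pos h3]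
        show (t :: (mid2 ++ [s])).set 0 (PySem.Str.lower (String.ofList t.dropLast)).toList = _
        rw [List.set_cons_zero, lower_toList, lookL, if_neg h1, if_pos ⟨h2, h3⟩]
      · rw [if_neg h3]
        show t :: (mid2 ++ [s]) = _
        rw [lookL, if_neg h1, if_neg (fun hc => h3 hc.2)]
    · rw [if_neg (fun hb => h2 ((endswith_iff_getLast t).mp hb))]
      rw [lookL, if_neg h1, if_neg (fun hc => h2 hc.1)]

set_option maxRecDepth 40000 in
theorem tailEdit_eval (h1 s : List Char) (mid2 : List (List Char)) :
    (match pvMapping.get? (String.ofList s) with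
     | some v => (h1 :: (mid2 ++ [s])).set ((h1 :: (mid2 ++ [s])).length - 1) v.toList
     | none =>
       if PySem.Chars.startswith s ['_'] then
         match pvMapping.get? (String.ofList (PySem.List.slice s (some 1) none)) with
         | some v => (h1 :: (mid2 ++ [s])).set ((h1 :: (mid2 ++ [s])).length - 1) v.toList
         | none => h1 :: (mid2 ++ [s])
       else h1 :: (mid2 ++ [s]))
    = h1 :: (mid2 ++ [lookR pvKeys s]) := by
  have htl : (PySem.List.pyGet? (h1 :: (mid2 ++ [s])) (-1)).getD [] = s := by
    rw [pyget_neg_one]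
    rfl
  have hset : ∀ v : List Char, (h1 :: (mid2 ++ [s])).set ((h1 :: (mid2 ++ [s])).length - 1) v
      = h1 :: (mid2 ++ [v]) := by
    intro v
    rw [show (h1 :: (mid2 ++ [s])).length - 1 = (h1::mid2).length by simp]
    rw [show h1 :: (mid2 ++ [s]) = (h1::mid2) ++ [s] from rfl, set_last]
    rfl
  rw [pvGet s]
  by_cases hs1 : s ∈ pvKeys
  · rw [if_pos hs1]
    show (h1 :: (mid2 ++ [s])).set ((h1 :: (mid2 ++ [s])).length - 1)
        (PySem.Str.lower (String.ofList s)).toList = _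
    rw [hset, lower_toList, lookR, if_pos hs1]
  · rw [if_neg hs1]
    show (if PySem.Chars.startswith s ['_'] then _ else _) = _
    by_cases hs2 : s.head? = some '_'
    · rw [if_pos ((startswith_iff_head s).mpr hs2), slice_from_one, pvGet s.tail]
      by_cases hs3 : s.tail ∈ pvKeys
      · rw [if_pos hs3]
        show (h1 :: (mid2 ++ [s])).set ((h1 :: (mid2 ++ [s])).length - 1)
            (PySem.Str.lower (String.ofList s.tail)).toList = _
        rw [hset, lower_toList, lookR, if_neg hs1, if_pos ⟨hs2, hs3⟩]
      · rw [if_neg hs3]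
        show h1 :: (mid2 ++ [s]) = _
        rw [lookR, if_neg hs1, if_neg (fun hc => hs3 hc.2)]
    · rw [if_neg (fun hb => hs2 ((startswith_iff_head s).mp hb))]
      rw [lookR, if_neg hs1, if_neg (fun hc => hs2 hc.1)]

set_option maxRecDepth 40000 in
theorem bfun_one (last k : Nat) (piece : List Char)
    (hone : ¬ (PySem.Chars.splitOn piece ['/']).length > 1) : bfun last k piece = piece := by
  simp only [bfun]
  rw [if_neg hone]

set_option maxRecDepth 40000 in
theorem bfun_eval (last k : Nat) (piece t s : List Char) (mid2 : List (List Char))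
    (hparts : PySem.Chars.splitOn piece ['/'] = t :: (mid2 ++ [s])) :
    bfun last k piece
      = myJoin '/' ((if 0 < k then lookL pvKeys t else t) ::
          (mid2 ++ [if k < last then lookR pvKeys s else s])) := by
  simp only [bfun, hparts]
  rw [if_pos (by simp), join_eq_myJoin]
  by_cases hk : 0 < k
  · rw [if_pos hk, if_pos hk]
    rw [show ((t :: (mid2 ++ [s])).getD 0 []) = t from rfl]
    rw [headEdit_eval t s mid2]
    by_cases hl : k < last
    · rw [if_pos hl, if_pos hl]
      rw [show ((PySem.List.pyGet? (lookL pvKeys t :: (mid2 ++ [s])) (-1)).getD []) = s by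
            rw [pyget_neg_one]; rfl]
      rw [tailEdit_eval (lookL pvKeys t) s mid2]
    · rw [if_neg hl, if_neg hl]
  · rw [if_neg hk, if_neg hk]
    by_cases hl : k < last
    · rw [if_pos hl, if_pos hl]
      rw [show ((PySem.List.pyGet? (t :: (mid2 ++ [s])) (-1)).getD []) = s by
            rw [pyget_neg_one]; rfl]
      rw [tailEdit_eval t s mid2]
    · rw [if_neg hl, if_neg hl]

set_option maxRecDepth 40000 in
theorem step_bridge (u s : String) :
    (PySem.Str.replace
      (PySem.Str.replace
        (PySem.Str.replace
          (PySem.Str.replace s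
            (" " ++ PySem.Str.replace (PySem.Str.upper u) " " "_" ++ "/")
            (" " ++ PySem.Str.replace (PySem.Str.lower u) " " "_" ++ "/"))
          (" " ++ PySem.Str.replace (PySem.Str.upper u) " " "_" ++ "_/")
          (" " ++ PySem.Str.replace (PySem.Str.lower u) " " "_" ++ "/"))
        ("/" ++ PySem.Str.replace (PySem.Str.upper u) " " "_" ++ " ")
        ("/" ++ PySem.Str.replace (PySem.Str.lower u) " " "_" ++ " "))
      ("/_" ++ PySem.Str.replace (PySem.Str.upper u) " " "_" ++ " ")
      ("/" ++ PySem.Str.replace (PySem.Str.lower u) " " "_" ++ " ")).toList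
    = r4c (pairOf u).1 (pairOf u).2 s.toList := by
  have l1 : (" " : String).toList = [' '] := rfl
  have l2 : ("/" : String).toList = ['/'] := rfl
  have l3 : ("_/" : String).toList = ['_','/'] := rfl
  have l4 : ("/_" : String).toList = ['/','_'] := rfl
  have l5 : ("_" : String).toList = ['_'] := rfl
  simp only [PySem.Str.toList_replace, String.toList_append, r4c, pairOf,
    l1, l2, l3, l4, l5, List.append_assoc, List.singleton_append, List.cons_append,
    List.nil_append]
  simp only [replace_eq_repl1]

theorem A_fold_bridge : ∀ (units : List String) (s : String),
    (units.foldl (fun text unit =>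
      let up := PySem.Str.replace (PySem.Str.upper unit) " " "_"
      let lo := PySem.Str.replace (PySem.Str.lower unit) " " "_"
      let text := PySem.Str.replace text (" " ++ up ++ "/") (" " ++ lo ++ "/")
      let text := PySem.Str.replace text (" " ++ up ++ "_/") (" " ++ lo ++ "/")
      let text := PySem.Str.replace text ("/" ++ up ++ " ") ("/" ++ lo ++ " ")
      let text := PySem.Str.replace text ("/_" ++ up ++ " ") ("/" ++ lo ++ " ")
      text) s).toList
    = foldA (units.map pairOf) s.toList := by
  intro units
  induction units with
  | nil => intro s; rfl
  | cons u rest ih =>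
    intro s
    rw [List.foldl_cons, List.map_cons]
    rw [show foldA (pairOf u :: rest.map pairOf) s.toList
        = foldA (rest.map pairOf) (r4c (pairOf u).1 (pairOf u).2 s.toList) from rfl]
    rw [← step_bridge u s]
    exact ih _

theorem piece_single (p t : List Char) (h : splitc '/' p = [t]) : p = t := by
  have := myJoin_splitc '/' p
  rw [h] at this
  simpa [myJoin] using this.symm

set_option maxRecDepth 40000 in
theorem bfun_co (last k : Nat) (p : List Char) (hk : ¬ 0 < k) (hl : ¬ k < last) :
    bfun last k p = p := by
  have hsc : PySem.Chars.splitOn p ['/'] = splitc '/' p := splitOn_eq_splitc '/' p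
  rcases h : splitc '/' p with _ | ⟨t, rest⟩
  · exact absurd h (splitc_ne_nil '/' p)
  rcases List.eq_nil_or_concat rest with rfl | ⟨mid2, s, rfl⟩
  · exact bfun_one last k p (by rw [hsc, h]; simp)
  · rw [List.concat_eq_append] at h
    rw [bfun_eval last k p t s mid2 (by rw [hsc, h]), if_neg hk, if_neg hl, ← h]
    exact myJoin_splitc '/' p

set_option maxRecDepth 40000 in
theorem bfun_chainB (last k : Nat) (p : List Char) (hk : 0 < k) (hl : k < last) :
    bfun last k p = chainB pvUs p := by
  have hsc : PySem.Chars.splitOn p ['/'] = splitc '/' p := splitOn_eq_splitc '/' p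
  rcases h : splitc '/' p with _ | ⟨t, rest⟩
  · exact absurd h (splitc_ne_nil '/' p)
  rcases List.eq_nil_or_concat rest with rfl | ⟨mid2, s, rfl⟩
  · rw [bfun_one last k p (by rw [hsc, h]; simp)]
    rw [chainB_id pvUs p (piece_single p t h ▸ splitc_sepfree '/' p t (h ▸ List.mem_cons_self ..))]
  · rw [List.concat_eq_append] at h
    have ht : '/' ∉ t := splitc_sepfree '/' p t (by rw [h]; exact List.mem_cons_self ..)
    have hs : '/' ∉ s := splitc_sepfree '/' p s (by rw [h]; simp)
    rw [bfun_eval last k p t s mid2 (by rw [hsc, h]), if_pos hk, if_pos hl]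
    rw [show p = myJoin '/' (t :: (mid2 ++ [s])) by rw [← h]; exact (myJoin_splitc '/' p).symm]
    rw [chainB_join pvUs pvGoodUnits t s mid2 ht hs]
    rw [LfoldP_eq_lookL pvUs pvGoodVals pvGoodInert t, RfoldP_eq_lookR pvUs pvGoodVals pvGoodInert s]
    rfl

set_option maxRecDepth 40000 in
theorem bfun_chainR (last : Nat) (p : List Char) (hl : 0 < last) :
    bfun last 0 p = chainR pvUs p := by
  have hsc : PySem.Chars.splitOn p ['/'] = splitc '/' p := splitOn_eq_splitc '/' p
  rcases h : splitc '/' p with _ | ⟨t, rest⟩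
  · exact absurd h (splitc_ne_nil '/' p)
  rcases List.eq_nil_or_concat rest with rfl | ⟨mid2, s, rfl⟩
  · rw [bfun_one last 0 p (by rw [hsc, h]; simp)]
    rw [chainR_id pvUs p (piece_single p t h ▸ splitc_sepfree '/' p t (h ▸ List.mem_cons_self ..))]
  · rw [List.concat_eq_append] at h
    have hs : '/' ∉ s := splitc_sepfree '/' p s (by rw [h]; simp)
    rw [bfun_eval last 0 p t s mid2 (by rw [hsc, h]), if_neg (by decide), if_pos hl]
    rw [show p = myJoin '/' (t :: (mid2 ++ [s])) by rw [← h]; exact (myJoin_splitc '/' p).symm]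
    rw [show (t :: (mid2 ++ [s])) = (t :: mid2) ++ [s] from rfl]
    rw [chainR_join pvUs pvGoodUnits s (t :: mid2) (by simp) hs]
    rw [RfoldP_eq_lookR pvUs pvGoodVals pvGoodInert s]
    rfl

set_option maxRecDepth 40000 in
theorem bfun_chainL (last k : Nat) (p : List Char) (hk : 0 < k) (hl : ¬ k < last) :
    bfun last k p = chainL pvUs p := by
  have hsc : PySem.Chars.splitOn p ['/'] = splitc '/' p := splitOn_eq_splitc '/' p
  rcases h : splitc '/' p with _ | ⟨t, rest⟩
  · exact absurd h (splitc_ne_nil '/' p)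
  rcases List.eq_nil_or_concat rest with rfl | ⟨mid2, s, rfl⟩
  · rw [bfun_one last k p (by rw [hsc, h]; simp)]
    rw [chainL_id pvUs p (piece_single p t h ▸ splitc_sepfree '/' p t (h ▸ List.mem_cons_self ..))]
  · rw [List.concat_eq_append] at h
    have ht : '/' ∉ t := splitc_sepfree '/' p t (by rw [h]; exact List.mem_cons_self ..)
    rw [bfun_eval last k p t s mid2 (by rw [hsc, h]), if_pos hk, if_neg hl]
    rw [show p = myJoin '/' (t :: (mid2 ++ [s])) by rw [← h]; exact (myJoin_splitc '/' p).symm]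
    rw [chainL_join pvUs pvGoodUnits t (mid2 ++ [s]) (by simp) ht]
    rw [LfoldP_eq_lookL pvUs pvGoodVals pvGoodInert t]
    rfl

set_option maxRecDepth 40000 in
theorem main_toList (text : String) :
    (pvUnits.foldl (fun text unit =>
      let up := PySem.Str.replace (PySem.Str.upper unit) " " "_"
      let lo := PySem.Str.replace (PySem.Str.lower unit) " " "_"
      let text := PySem.Str.replace text (" " ++ up ++ "/") (" " ++ lo ++ "/")
      let text := PySem.Str.replace text (" " ++ up ++ "_/") (" " ++ lo ++ "/")
      let text := PySem.Str.replace text ("/" ++ up ++ " ") ("/" ++ lo ++ " ")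
      let text := PySem.Str.replace text ("/_" ++ up ++ " ") ("/" ++ lo ++ " ")
      text) text).toList
    = PySem.Chars.join [' ']
        ((PySem.Chars.splitOn text.toList [' ']).mapIdx
          (fun k piece => bfun ((PySem.Chars.splitOn text.toList [' ']).length - 1) k piece)) := by
  rw [A_fold_bridge pvUnits text, show pvUnits.map pairOf = pvUs from rfl]
  rw [join_eq_myJoin, splitOn_eq_splitc]
  have hsp := splitc_sepfree ' ' text.toList
  have hGood : ∀ ul ∈ pvUs, ' ' ∉ ul.1 ∧ ' ' ∉ ul.2 :=
    fun ul hul => ⟨(pvGoodUnits ul hul).1, (pvGoodUnits ul hul).2.1⟩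
  rcases h : splitc ' ' text.toList with _ | ⟨p0, rest⟩
  · exact absurd h (splitc_ne_nil _ _)
  have htext : myJoin ' ' (p0 :: rest) = text.toList := by
    rw [← h]; exact myJoin_splitc _ _
  rcases List.eq_nil_or_concat rest with rfl | ⟨mid, pl, rfl⟩
  · rw [show text.toList = myJoin ' ' [p0] by rw [← htext]]
    rw [foldA_single pvUs p0 hGood (hsp p0 (h ▸ List.mem_cons_self ..))]
    simp only [List.mapIdx_cons, List.mapIdx_nil]
    rw [bfun_co _ 0 p0 (by decide) (by simp)]
  · simp only [List.concat_eq_append] at h htext ⊢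
    have hp0 : ' ' ∉ p0 := hsp p0 (by rw [h]; exact List.mem_cons_self ..)
    have hpl : ' ' ∉ pl := hsp pl (by rw [h]; simp)
    have hmid : ∀ p ∈ mid, ' ' ∉ p := fun p hp => hsp p (by rw [h]; simp [hp])
    rw [show text.toList = myJoin ' ' (p0 :: (mid ++ [pl])) by rw [← htext]]
    rw [foldA_multi pvUs p0 pl mid hGood hp0 hpl hmid]
    rw [show (p0 :: (mid ++ [pl])).length - 1 = mid.length + 1 by simp]
    rw [List.mapIdx_cons]
    rw [mapIdx_absent (chainB pvUs) (chainL pvUs) _ mid pl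
          (fun i p hi => bfun_chainB (mid.length+1) (i+1) p (by omega) (by omega))
          (fun p => bfun_chainL (mid.length+1) (mid.length+1) p (by omega) (by omega))]
    rw [bfun_chainR (mid.length+1) p0 (by omega)]

set_option maxRecDepth 100000 in
theorem alt_unfold (text : String) :
    fix_units_alt text
      = PySem.Str.replace (String.ofList (PySem.Chars.join [' ']
          ((PySem.Chars.splitOn text.toList [' ']).mapIdx
            (fun k piece => bfun ((PySem.Chars.splitOn text.toList [' ']).length - 1) k piece))))
          "POLENERGIA/EQUINOR" "polenergia/equinor" := rfl

set_option maxRecDepth 100000 in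
theorem a_unfold (text : String) :
    fix_units text
      = PySem.Str.replace (pvUnits.foldl (fun text unit =>
          let up := PySem.Str.replace (PySem.Str.upper unit) " " "_"
          let lo := PySem.Str.replace (PySem.Str.lower unit) " " "_"
          let text := PySem.Str.replace text (" " ++ up ++ "/") (" " ++ lo ++ "/")
          let text := PySem.Str.replace text (" " ++ up ++ "_/") (" " ++ lo ++ "/")
          let text := PySem.Str.replace text ("/" ++ up ++ " ") ("/" ++ lo ++ " ")
          let text := PySem.Str.replace text ("/_" ++ up ++ " ") ("/" ++ lo ++ " ")
          text) text) "POLENERGIA/EQUINOR" "polenergia/equinor" := rfl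

set_option maxRecDepth 100000 in
theorem fix_units_eq_alt (text : String) : fix_units text = fix_units_alt text := by
  have h2 : (pvUnits.foldl (fun text unit =>
        let up := PySem.Str.replace (PySem.Str.upper unit) " " "_"
        let lo := PySem.Str.replace (PySem.Str.lower unit) " " "_"
        let text := PySem.Str.replace text (" " ++ up ++ "/") (" " ++ lo ++ "/")
        let text := PySem.Str.replace text (" " ++ up ++ "_/") (" " ++ lo ++ "/")
        let text := PySem.Str.replace text ("/" ++ up ++ " ") ("/" ++ lo ++ " ")
        let text := PySem.Str.replace text ("/_" ++ up ++ " ") ("/" ++ lo ++ " ")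
        text) text)
      = String.ofList (PySem.Chars.join [' ']
          ((PySem.Chars.splitOn text.toList [' ']).mapIdx
            (fun k piece => bfun ((PySem.Chars.splitOn text.toList [' ']).length - 1) k piece))) := by
    rw [← main_toList text, String.ofList_toList]
  rw [a_unfold, alt_unfold, h2]

-- ===== VERDICT (by name: the statement is the Claim_ definition above) =====
theorem fix_units_spec : Claim_equal_fix_units := by
  intro text _
  unfold Spec_fix_units
  exact fix_units_eq_alt text
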